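-- pv_equiv track=rewrite | github.com/MRFLucifer/HashCrack | HashCrack.py | parse_mask
-- ===== SOURCE A (Python) =====
-- def parse_mask(mask):
--     char_sets = {
--         '?l': 'abcdefghijklmnopqrstuvwxyz',
--         '?u': 'ABCDEFGHIJKLMNOPQRSTUVWXYZ',
--         '?d': '0123456789',
--         '?s': ' !"#$%&\'()*+,-./:;<=>?@[\\]^_`{|}~',
--         '?a': 'abcdefghijklmnopqrstuvwxyzABCDEFGHIJKLMNOPQRSTUVWXYZ0123456789!@#$%^&*()'
--     }
--     mask_parts = []
--     while mask:
--         if mask[:2] in char_sets: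
--             mask_parts.append(char_sets[mask[:2]])
--             mask = mask[2:]
--         else:
--             mask_parts.append(mask[0])
--             mask = mask[1:]
--     return mask_parts
-- ===== SOURCE B (Python) =====
-- def parse_mask(mask):
--     char_sets = {
--         '?l': 'abcdefghijklmnopqrstuvwxyz',
--         '?u': 'ABCDEFGHIJKLMNOPQRSTUVWXYZ',
--         '?d': '0123456789',
--         '?s': ' !"#$%&\'()*+,-./:;<=>?@[\\]^_`{|}~',
--         '?a': 'abcdefghijklmnopqrstuvwxyzABCDEFGHIJKLMNOPQRSTUVWXYZ0123456789!@#$%^&*()'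
--     }
--     chars = list(mask) if mask else []
--     n = len(chars)
--     tokens = []
--     i = 0
--     while i < n:
--         if chars[i] == '?' and i + 1 < n and chars[i + 1] in 'ludsa':
--             tokens.append(chars[i] + chars[i + 1])
--             i += 2
--         else:
--             tokens.append(chars[i])
--             i += 1
--     return [char_sets.get(t, t) for t in tokens]
-- ===== Notes on version B (the rewrite author's own statement) =====
-- stated objective: faster
-- what changed: Replaces A's repeated string re-slicing loop (mask = mask[1:]/[2:] with dict-membership on mask[:2]) by a single index-based scan over the character list that first builds a token list ('?x' charset tokens vs single chars) and then maps each token through char_sets.get(t, t).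
import Mathlib
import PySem

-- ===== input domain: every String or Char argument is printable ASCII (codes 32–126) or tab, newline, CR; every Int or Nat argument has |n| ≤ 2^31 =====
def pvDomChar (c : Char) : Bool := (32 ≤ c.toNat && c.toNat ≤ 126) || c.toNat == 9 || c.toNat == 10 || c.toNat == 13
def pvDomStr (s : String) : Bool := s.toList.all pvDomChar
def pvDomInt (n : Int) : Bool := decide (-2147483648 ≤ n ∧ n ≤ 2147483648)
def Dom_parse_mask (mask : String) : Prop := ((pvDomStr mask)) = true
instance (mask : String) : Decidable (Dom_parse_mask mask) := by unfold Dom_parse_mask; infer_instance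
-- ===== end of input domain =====

-- B replaces A's quadratic re-slicing loop by a single index scan that tokenizes first
-- and then maps tokens through the table (objective: faster, O(n) vs O(n^2) copying).

-- the literal dict both Pythons build
def pvCharSets : PySem.Dict String String := PySem.Dict.mk
  [("?l", "abcdefghijklmnopqrstuvwxyz"),
   ("?u", "ABCDEFGHIJKLMNOPQRSTUVWXYZ"),
   ("?d", "0123456789"),
   ("?s", " !\"#$%&'()*+,-./:;<=>?@[\\]^_`{|}~"),
   ("?a", "abcdefghijklmnopqrstuvwxyzABCDEFGHIJKLMNOPQRSTUVWXYZ0123456789!@#$%^&*()")]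

-- ===== PORT A =====
-- A's `mask[:2] in char_sets` followed by `char_sets[mask[:2]]` is ported as one get? lookup
def parseMaskLoopA : List Char → List String
  | [] => []                                   -- while mask: ... (falls out when empty)
  | c :: rest =>
    match pvCharSets.get? (String.ofList (List.take 2 (c :: rest))) with
    | some v => v :: parseMaskLoopA (List.drop 1 rest)   -- append expansion; mask = mask[2:]
    | none => String.ofList [c] :: parseMaskLoopA rest       -- append mask[0]; mask = mask[1:]
termination_by l => l.length
decreasing_by · simp
              · simp

def parse_mask (mask : String) : List String := parseMaskLoopA mask.toList

-- ===== PORT B =====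
-- tokenize: the index scan of Source B (charset token '?x' with x in 'ludsa', else one char)
def tokenizeB : List Char → List String
  | [] => []
  | '?' :: d :: rest =>
    if ['l', 'u', 'd', 's', 'a'].contains d then String.ofList ['?', d] :: tokenizeB rest
    else String.ofList ['?'] :: tokenizeB (d :: rest)
  | c :: rest => String.ofList [c] :: tokenizeB rest

def parse_mask_alt (mask : String) : List String :=
  (tokenizeB mask.toList).map (fun t => pvCharSets.getD t t)

-- ===== PRECONDITION & SPEC =====
def Spec_parse_mask (mask : String) (out : List String) : Prop := out = parse_mask_alt mask
instance (mask : String) (out : List String) : Decidable (Spec_parse_mask mask out) := by unfold Spec_parse_mask; infer_instance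

-- ===== CLAIM (what is proved, stated in full; the proofs are below) =====
def Claim_equal_parse_mask : Prop := ∀ (mask : String), Dom_parse_mask mask → Spec_parse_mask mask (parse_mask mask)

-- ===== LEMMAS AND PROOFS =====

-- a one-character key is never in the table
theorem pv_get1_none (c : Char) : pvCharSets.get? (String.ofList [c]) = none := by
  simp [pvCharSets, PySem.Dict.get?, String.ext_iff]

theorem pv_getD1 (c : Char) :
    pvCharSets.getD (String.ofList [c]) (String.ofList [c]) = String.ofList [c] := by
  simp [PySem.Dict.getD_eq_get?_getD, pv_get1_none]

-- a two-character key hits the table exactly for '?l','?u','?d','?s','?a'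
theorem pv_get2 (c d : Char) :
    pvCharSets.get? (String.ofList [c, d]) =
      if c = '?' ∧ ['l', 'u', 'd', 's', 'a'].contains d then
        some (pvCharSets.getD (String.ofList [c, d]) (String.ofList [c, d]))
      else none := by
  by_cases hc : c = '?'
  · subst hc
    by_cases hl : d = 'l'; · subst hl; decide
    by_cases hu : d = 'u'; · subst hu; decide
    by_cases hd : d = 'd'; · subst hd; decide
    by_cases hs : d = 's'; · subst hs; decide
    by_cases ha : d = 'a'; · subst ha; decide
    have hl' : ¬ ('l' = d) := fun h => hl h.symm
    have hu' : ¬ ('u' = d) := fun h => hu h.symm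
    have hd' : ¬ ('d' = d) := fun h => hd h.symm
    have hs' : ¬ ('s' = d) := fun h => hs h.symm
    have ha' : ¬ ('a' = d) := fun h => ha h.symm
    simp [pvCharSets, PySem.Dict.get?, String.ext_iff,
          hl, hu, hd, hs, ha, hl', hu', hd', hs', ha']
  · have hc' : ¬ ('?' = c) := fun h => hc h.symm
    simp [pvCharSets, PySem.Dict.get?, String.ext_iff, hc, hc']

theorem pv_loop_eq : ∀ (l : List Char),
    parseMaskLoopA l = (tokenizeB l).map (fun t => pvCharSets.getD t t)
  | [] => by simp [parseMaskLoopA, tokenizeB]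
  | [c] => by
    by_cases hc : c = '?'
    · subst hc
      have h1 : pvCharSets.get? "?" = none := by decide
      have h2 : pvCharSets.getD "?" "?" = "?" := by decide
      simp [parseMaskLoopA, tokenizeB, h1, h2]
    · simp [parseMaskLoopA, tokenizeB, pv_get1_none, pv_getD1, hc]
  | c :: d :: rs => by
    have ih1 := pv_loop_eq rs
    have ih2 := pv_loop_eq (d :: rs)
    by_cases h : c = '?' ∧ ['l', 'u', 'd', 's', 'a'].contains d
    · obtain ⟨rfl, hd⟩ := h
      simp at hd
      simp [parseMaskLoopA, tokenizeB, pv_get2, hd, ih1]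
    · by_cases hc : c = '?'
      · subst hc
        have hd : ¬ (['l', 'u', 'd', 's', 'a'].contains d = true) := fun hdd => h ⟨rfl, hdd⟩
        simp at hd
        have hq : pvCharSets.getD "?" "?" = "?" := by decide
        simp [parseMaskLoopA, tokenizeB, pv_get2, hd, hq, ih2]
      · simp [parseMaskLoopA, tokenizeB, pv_get2, hc, pv_getD1, ih2]
termination_by l => l.length

-- ===== VERDICT (by name: the statement is the Claim_ definition above) =====
theorem parse_mask_spec : Claim_equal_parse_mask := by
  intro mask _
  unfold Spec_parse_mask parse_mask parse_mask_alt
  exact pv_loop_eq mask.toList
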